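-- pv_equiv track=rewrite | github.com/ZanahZDK/traductorZenakud | Gen_Dictionary.py | generar_combinaciones
-- ===== SOURCE A (Python) =====
-- letras = ['A', 'D', 'E', 'J', 'K', 'M', 'N', 'O', 'S', 'W']
--
-- def generar_combinaciones(prefix, depth, max_depth):
--     if depth == max_depth:
--         return [prefix]
--     combinaciones = []
--     for letra in letras:
--         # Asegurarse de no añadir más de dos letras iguales consecutivas
--         if len(prefix) >= 2 and prefix[-1] == letra and prefix[-2] == letra:
--             continue
--         combinaciones.extend(generar_combinaciones(prefix + letra, depth + 1, max_depth))
--     return combinaciones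
-- ===== SOURCE B (Python) =====
-- letras = ['A', 'D', 'E', 'J', 'K', 'M', 'N', 'O', 'S', 'W']
--
-- def generar_combinaciones(prefix, depth, max_depth):
--     # Iterative level-by-level (BFS) expansion instead of DFS recursion.
--     level = [prefix]
--     for _ in range(max_depth - depth):
--         nxt = []
--         for s in level:
--             for letra in letras:
--                 if len(s) >= 2 and s[-1] == letra and s[-2] == letra:
--                     continue
--                 nxt.append(s + letra)
--         level = nxt
--     return level
-- ===== Notes on version B (the rewrite author's own statement) =====
-- stated objective: alternative
-- what changed: Replaces the DFS recursion with an iterative level-by-level (BFS) expansion of a worklist of partial strings, preserving the exact output order; Pre_ excludes depth > max_depth, where A recurses forever (RecursionError) while B's loop runs zero times.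
import Mathlib
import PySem

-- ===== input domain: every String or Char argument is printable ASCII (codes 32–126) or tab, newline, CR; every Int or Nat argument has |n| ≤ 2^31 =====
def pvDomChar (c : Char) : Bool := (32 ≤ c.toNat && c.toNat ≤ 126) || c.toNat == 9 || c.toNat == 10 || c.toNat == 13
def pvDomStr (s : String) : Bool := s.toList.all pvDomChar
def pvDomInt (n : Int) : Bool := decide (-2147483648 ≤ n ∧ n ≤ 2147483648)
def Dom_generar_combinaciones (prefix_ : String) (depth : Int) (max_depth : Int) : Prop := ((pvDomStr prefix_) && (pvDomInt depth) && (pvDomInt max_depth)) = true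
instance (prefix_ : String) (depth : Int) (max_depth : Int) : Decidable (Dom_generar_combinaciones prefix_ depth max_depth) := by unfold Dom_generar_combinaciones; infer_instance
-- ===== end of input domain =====

-- B replaces A's DFS recursion by an iterative level-by-level (BFS) worklist expansion
-- with the same output order; equivalence is proved for depth ≤ max_depth (A diverges otherwise).

-- ===== PORT A =====
def letras : List Char := ['A', 'D', 'E', 'J', 'K', 'M', 'N', 'O', 'S', 'W']

-- A's recursion terminates only when depth ≤ max_depth; the fuel (max_depth - depth).toNat
-- counts the remaining recursion depth exactly on those inputs (fuel 0 ↔ depth == max_depth).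
-- depth/max_depth are carried along as in the Python even though only the fuel drives recursion.
def genAfuel : Nat → List Char → Int → Int → List (List Char)
  | 0, p, _, _ => [p]
  | n+1, p, d, m =>
      letras.foldl (fun acc letra =>
        if p.length ≥ 2 ∧ PySem.List.pyGet? p (-1) = some letra ∧ PySem.List.pyGet? p (-2) = some letra then
          acc
        else
          acc ++ genAfuel n (p ++ [letra]) (d + 1) m) []

def generar_combinaciones (prefix_ : String) (depth : Int) (max_depth : Int) : List String :=
  (genAfuel (max_depth - depth).toNat prefix_.toList depth max_depth).map String.ofList

-- ===== PORT B =====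
-- one round of the level loop: for s in level: for letra in letras: … nxt.append(s + letra)
def stepB (xs : List (List Char)) : List (List Char) :=
  xs.foldl (fun nxt s =>
    letras.foldl (fun acc letra =>
      if s.length ≥ 2 ∧ PySem.List.pyGet? s (-1) = some letra ∧ PySem.List.pyGet? s (-2) = some letra then
        acc
      else
        acc ++ [s ++ [letra]]) nxt) []

def genBloop : Nat → List (List Char) → List (List Char)
  | 0, xs => xs
  | n+1, xs => genBloop n (stepB xs)

def generar_combinaciones_alt (prefix_ : String) (depth : Int) (max_depth : Int) : List String :=
  (genBloop (max_depth - depth).toNat [prefix_.toList]).map String.ofList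

-- ===== PRECONDITION & SPEC =====
-- Pre_ excludes depth > max_depth, where the Python A recurses forever (RecursionError).
def Pre_generar_combinaciones (prefix_ : String) (depth : Int) (max_depth : Int) : Prop :=
  depth ≤ max_depth
instance (prefix_ : String) (depth : Int) (max_depth : Int) : Decidable (Pre_generar_combinaciones prefix_ depth max_depth) := by unfold Pre_generar_combinaciones; infer_instance

def pvWitness_generar_combinaciones : String × Int × Int := ("AA", 1, 3)

def Spec_generar_combinaciones (prefix_ : String) (depth : Int) (max_depth : Int) (out : List String) : Prop := out = generar_combinaciones_alt prefix_ depth max_depth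
instance (prefix_ : String) (depth : Int) (max_depth : Int) (out : List String) : Decidable (Spec_generar_combinaciones prefix_ depth max_depth out) := by unfold Spec_generar_combinaciones; infer_instance

-- ===== CLAIM (what is proved, stated in full; the proofs are below) =====
def Claim_equal_generar_combinaciones : Prop := ∀ (prefix_ : String) (depth : Int) (max_depth : Int), Dom_generar_combinaciones prefix_ depth max_depth → Pre_generar_combinaciones prefix_ depth max_depth → Spec_generar_combinaciones prefix_ depth max_depth (generar_combinaciones prefix_ depth max_depth)


-- ===== LEMMAS AND PROOFS =====

-- the admissible one-letter extensions of s, in letras order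
def children (s : List Char) : List (List Char) :=
  letras.foldl (fun acc letra =>
    if s.length ≥ 2 ∧ PySem.List.pyGet? s (-1) = some letra ∧ PySem.List.pyGet? s (-2) = some letra then
      acc
    else
      acc ++ [s ++ [letra]]) []

lemma foldl_if_append {α β : Type} (f : α → List β) (c : α → Prop) [DecidablePred c] :
    ∀ (L : List α) (init : List β),
      L.foldl (fun acc x => if c x then acc else acc ++ f x) init
        = init ++ L.foldl (fun acc x => if c x then acc else acc ++ f x) [] := by
  intro L
  induction L with
  | nil => intro init; simp
  | cons a L ih =>
      intro init
      simp only [List.foldl_cons]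
      rw [ih, ih (if c a then [] else [] ++ f a)]
      split <;> simp

lemma children_inner (s : List Char) (init : List (List Char)) :
    letras.foldl (fun acc letra =>
      if s.length ≥ 2 ∧ PySem.List.pyGet? s (-1) = some letra ∧ PySem.List.pyGet? s (-2) = some letra then
        acc
      else
        acc ++ [s ++ [letra]]) init = init ++ children s := by
  rw [children, foldl_if_append (fun letra => [s ++ [letra]])
    (fun letra => s.length ≥ 2 ∧ PySem.List.pyGet? s (-1) = some letra ∧ PySem.List.pyGet? s (-2) = some letra)]

lemma stepB_eq_flatMap : ∀ (xs : List (List Char)) ,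
    stepB xs = xs.flatMap children := by
  have key : ∀ (xs : List (List Char)) (init : List (List Char)),
      xs.foldl (fun nxt s =>
        letras.foldl (fun acc letra =>
          if s.length ≥ 2 ∧ PySem.List.pyGet? s (-1) = some letra ∧ PySem.List.pyGet? s (-2) = some letra then
            acc
          else
            acc ++ [s ++ [letra]]) nxt) init = init ++ xs.flatMap children := by
    intro xs
    induction xs with
    | nil => intro init; simp
    | cons s xs ih =>
        intro init
        simp only [List.foldl_cons]
        rw [children_inner, ih, List.flatMap_cons, List.append_assoc]
  intro xs
  rw [stepB, key]
  simp

lemma genAfuel_indep : ∀ (n : Nat) (p : List Char) (d m d' m' : Int),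
    genAfuel n p d m = genAfuel n p d' m' := by
  intro n
  induction n with
  | zero => intro p d m d' m'; rfl
  | succ n ih =>
      intro p d m d' m'
      simp only [genAfuel]
      congr 1
      funext acc letra
      split
      · rfl
      · rw [ih (p ++ [letra]) (d+1) m (d'+1) m']

lemma genAfuel_succ (n : Nat) (p : List Char) (d m : Int) :
    genAfuel (n+1) p d m = (children p).flatMap (fun q => genAfuel n q d m) := by
  simp only [genAfuel]
  have key : ∀ (L : List Char) (init : List (List Char)),
      L.foldl (fun acc letra =>
        if p.length ≥ 2 ∧ PySem.List.pyGet? p (-1) = some letra ∧ PySem.List.pyGet? p (-2) = some letra then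
          acc
        else
          acc ++ genAfuel n (p ++ [letra]) (d + 1) m) init
      = init ++ (L.foldl (fun acc letra =>
          if p.length ≥ 2 ∧ PySem.List.pyGet? p (-1) = some letra ∧ PySem.List.pyGet? p (-2) = some letra then
            acc
          else
            acc ++ [p ++ [letra]]) []).flatMap (fun q => genAfuel n q d m) := by
    intro L
    induction L with
    | nil => intro init; simp
    | cons a L ih =>
        intro init
        simp only [List.foldl_cons]
        rw [ih, foldl_if_append (fun letra => [p ++ [letra]])
          (fun letra => p.length ≥ 2 ∧ PySem.List.pyGet? p (-1) = some letra ∧ PySem.List.pyGet? p (-2) = some letra)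
          L (if p.length ≥ 2 ∧ PySem.List.pyGet? p (-1) = some a ∧ PySem.List.pyGet? p (-2) = some a then [] else [] ++ [p ++ [a]])]
        split
        · simp
        · simp [genAfuel_indep n (p ++ [a]) (d+1) m d m]
  rw [key letras []]
  simp [children]

lemma genBloop_eq : ∀ (n : Nat) (xs : List (List Char)) (d m : Int),
    genBloop n xs = xs.flatMap (fun p => genAfuel n p d m) := by
  intro n
  induction n with
  | zero => intro xs d m; simp [genBloop, genAfuel]
  | succ n ih =>
      intro xs d m
      rw [genBloop, stepB_eq_flatMap, ih _ d m, List.flatMap_assoc]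
      congr 1
      funext p
      rw [genAfuel_succ]

-- ===== VERDICT (by name: the statement is the Claim_ definition above) =====
theorem generar_combinaciones_spec : Claim_equal_generar_combinaciones := by
  intro prefix_ depth max_depth _ _
  unfold Spec_generar_combinaciones generar_combinaciones generar_combinaciones_alt
  rw [genBloop_eq _ _ depth max_depth]
  simp
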